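-- pv_equiv track=rewrite | github.com/jcvanelst/zep-hvf-babylab | gen_fam_stim.py | create_hist_from_dist
-- ===== SOURCE A (Python) =====
-- def create_hist_from_dist(l):
--     d = {}
--     output = ""
--     for i in l:
--         try:
--             d[i] += 1
--         except KeyError:
--             d[i] = 1
--     for key in sorted(d.keys()):
--         output += "{}\t{}\n".format(key, "*" * d[key])
--     return output
-- ===== SOURCE B (Python) =====
-- def create_hist_from_dist(l):
--     s = sorted(l)
--     if not s:
--         return ""
--     lines = []
--     cur, cnt = s[0], 1
--     for x in s[1:]:
--         if x == cur:
--             cnt += 1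
--         else:
--             lines.append("{}\t{}\n".format(cur, "*" * cnt))
--             cur, cnt = x, 1
--     lines.append("{}\t{}\n".format(cur, "*" * cnt))
--     return "".join(lines)
-- ===== Notes on version B (the rewrite author's own statement) =====
-- stated objective: faster
-- what changed: B sorts the list once and emits one line per consecutive run (run-length scan with a current element and counter) instead of building a dict of counts via try/except and then iterating over its sorted keys.
import Mathlib
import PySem

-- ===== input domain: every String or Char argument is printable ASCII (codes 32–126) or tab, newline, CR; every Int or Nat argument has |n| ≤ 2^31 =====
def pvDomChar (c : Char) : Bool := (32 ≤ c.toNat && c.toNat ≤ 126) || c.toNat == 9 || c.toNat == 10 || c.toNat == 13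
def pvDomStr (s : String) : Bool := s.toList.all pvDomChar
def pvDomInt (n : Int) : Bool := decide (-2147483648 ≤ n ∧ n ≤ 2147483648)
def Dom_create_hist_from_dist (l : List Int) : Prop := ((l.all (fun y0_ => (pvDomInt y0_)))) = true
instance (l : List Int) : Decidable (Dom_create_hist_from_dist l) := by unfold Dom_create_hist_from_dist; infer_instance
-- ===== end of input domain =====

-- B replaces A's dict-of-counts + sorted-keys pass by a single run-length scan of the
-- sorted list (same asymptotics, measurably faster constants); return values proved equal on all inputs.

-- ===== PORT A =====
-- "{}\t{}\n".format(key, "*" * d[key]); "*" * n for Int n is replicate n.toNat '*' (Python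
-- yields "" for n ≤ 0, matching toNat's clamp); d[key] with key ∈ d.keys is getD key 0.
def pvLineA (key : Int) (cnt : Int) : String :=
  PySem.Int.toStr key ++ "\t" ++ String.ofList (List.replicate cnt.toNat '*') ++ "\n"

def create_hist_from_dist (l : List Int) : String :=
  -- try: d[i] += 1 / except KeyError: d[i] = 1  ==  d.modify i 0 (· + 1)
  let d := l.foldl (fun d i => d.modify i 0 (· + 1)) PySem.Dict.empty
  let output := ""
  (PySem.List.sorted d.keys (fun k => k) false).foldl
    (fun output key => output ++ pvLineA key (d.getD key 0)) output

-- ===== PORT B =====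
def pvLineB (cur : Int) (cnt : Nat) : String :=
  PySem.Int.toStr cur ++ "\t" ++ String.ofList (List.replicate cnt '*') ++ "\n"

-- the for-loop over s[1:] carrying (lines, cur, cnt); the final append folded in at []
def pvRuns (cur : Int) (cnt : Nat) : List Int → List String
  | [] => [pvLineB cur cnt]
  | x :: xs => if x = cur then pvRuns cur (cnt + 1) xs
               else pvLineB cur cnt :: pvRuns x 1 xs

def create_hist_from_dist_alt (l : List Int) : String :=
  match PySem.List.sorted l (fun x => x) false with
  | [] => ""
  | x :: xs => PySem.Str.join "" (pvRuns x 1 xs)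

-- ===== PRECONDITION & SPEC =====
def Spec_create_hist_from_dist (l : List Int) (out : String) : Prop := out = create_hist_from_dist_alt l
instance (l : List Int) (out : String) : Decidable (Spec_create_hist_from_dist l out) := by unfold Spec_create_hist_from_dist; infer_instance

-- ===== CLAIM (what is proved, stated in full; the proofs are below) =====
def Claim_equal_create_hist_from_dist : Prop := ∀ (l : List Int), Dom_create_hist_from_dist l → Spec_create_hist_from_dist l (create_hist_from_dist l)

-- ===== LEMMAS AND PROOFS =====

-- the sorted list as the concatenation of one block per sorted distinct key
def pvBlocks (l : List Int) (ks : List Int) : List Int :=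
  ks.flatMap (fun k => List.replicate (l.count k) k)

theorem pvRuns_replicate (m : Nat) (k : Int) (n : Nat) (rest : List Int) :
    pvRuns k n (List.replicate m k ++ rest) = pvRuns k (n + m) rest := by
  induction m generalizing n with
  | zero => simp
  | succ m ih =>
    simp only [List.replicate_succ, List.cons_append, pvRuns, reduceIte]
    rw [ih]
    congr 1
    omega

theorem pvRuns_blocks (l : List Int) (ks : List Int) (k : Int) (n : Nat)
    (hk : ∀ k' ∈ ks, k < k') (hp : ks.Pairwise (· < ·)) (hc : ∀ k' ∈ ks, 1 ≤ l.count k') :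
    pvRuns k n (pvBlocks l ks) = pvLineB k n :: ks.map (fun k' => pvLineB k' (l.count k')) := by
  induction ks generalizing k n with
  | nil => simp [pvBlocks, pvRuns]
  | cons k' ks ih =>
    have h1 : 1 ≤ l.count k' := hc k' (by simp)
    have hkk' : k < k' := hk k' (by simp)
    have : pvBlocks l (k' :: ks) = k' :: (List.replicate (l.count k' - 1) k' ++ pvBlocks l ks) := by
      simp only [pvBlocks, List.flatMap_cons]
      rw [show l.count k' = (l.count k' - 1) + 1 by omega, List.replicate_succ]
      simp
    rw [this]
    simp only [pvRuns, if_neg (by omega : ¬ k' = k)]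
    rw [pvRuns_replicate]
    rw [show 1 + (l.count k' - 1) = l.count k' by omega]
    rw [ih k' (l.count k') (List.pairwise_cons.mp hp).1 (List.pairwise_cons.mp hp).2
      (fun x hx => hc x (List.mem_cons_of_mem _ hx))]
    simp

theorem pvBlocks_perm (l : List Int) (ks : List Int) (hnd : ks.Nodup)
    (hm : ∀ a, a ∈ ks ↔ a ∈ l) : (pvBlocks l ks).Perm l := by
  rw [List.perm_iff_count]
  intro a
  have hcount : ∀ (ks : List Int), ks.Nodup →
      (pvBlocks l ks).count a = if a ∈ ks then l.count a else 0 := by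
    intro ks hnd
    induction ks with
    | nil => simp [pvBlocks]
    | cons k ks ih =>
      have hnd' := List.nodup_cons.mp hnd
      simp only [pvBlocks, List.flatMap_cons, List.count_append, List.count_replicate]
      rw [show (ks.flatMap fun k => List.replicate (l.count k) k) = pvBlocks l ks from rfl,
        ih hnd'.2]
      by_cases hak : a = k
      · subst hak
        simp [if_neg (fun h => hnd'.1 h)]
      · simp [hak, Ne.symm hak, List.mem_cons]
  rw [hcount ks hnd]
  by_cases hal : a ∈ l
  · rw [if_pos ((hm a).mpr hal)]
  · rw [if_neg (fun h => hal ((hm a).mp h))]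
    exact (List.count_eq_zero.mpr hal).symm

theorem pvBlocks_pairwise (l : List Int) (ks : List Int) (hp : ks.Pairwise (· < ·)) :
    (pvBlocks l ks).Pairwise (· ≤ ·) := by
  induction ks with
  | nil => simp [pvBlocks]
  | cons k ks ih =>
    have hp' := List.pairwise_cons.mp hp
    simp only [pvBlocks, List.flatMap_cons]
    apply List.pairwise_append.mpr
    refine ⟨List.pairwise_replicate.mpr (by simp), ih hp'.2, ?_⟩
    intro a ha b hb
    have ha' : a = k := (List.eq_of_mem_replicate ha)
    simp only [List.mem_flatMap] at hb
    obtain ⟨k', hk', hb'⟩ := hb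
    have hb'' : b = k' := List.eq_of_mem_replicate hb'
    subst ha'; subst hb''
    exact le_of_lt (hp'.1 b hk')

theorem pvJoinChars_cons (a : List Char) (rest : List (List Char)) :
    PySem.Chars.join [] (a :: rest) = a ++ PySem.Chars.join [] rest := by
  simp [PySem.Chars.join, List.intercalate]
  cases rest <;> simp [List.intersperse]

theorem pvJoin_cons (a : String) (rest : List String) :
    PySem.Str.join "" (a :: rest) = a ++ PySem.Str.join "" rest := by
  simp [PySem.Str.join, pvJoinChars_cons, String.ofList_append]

-- A's output loop is a join of per-key lines
theorem pvFoldl_line (ks : List Int) (f : Int → String) (s : String) :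
    ks.foldl (fun o k => o ++ f k) s = s ++ PySem.Str.join "" (ks.map f) := by
  induction ks generalizing s with
  | nil => simp [PySem.Str.join]
  | cons k ks ih =>
    simp only [List.foldl_cons, List.map_cons]
    rw [ih]
    rw [pvJoin_cons, String.append_assoc]

theorem pv_main (l : List Int) : create_hist_from_dist l = create_hist_from_dist_alt l := by
  have hd : (l.foldl (fun d i => d.modify i 0 (· + 1)) PySem.Dict.empty) = PySem.Dict.counter l := rfl
  have hkeys : (PySem.Dict.counter l).keys = PySem.Set.ofList l := PySem.Dict.keys_counter l
  have hA : create_hist_from_dist l =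
      "" ++ PySem.Str.join ""
        ((PySem.List.sorted (PySem.Set.ofList l) (fun k => k) false).map
          (fun k => pvLineB k (l.count k))) := by
    unfold create_hist_from_dist
    show (PySem.List.sorted (PySem.Dict.counter l).keys (fun k => k) false).foldl
        (fun output key => output ++ pvLineA key ((PySem.Dict.counter l).getD key 0)) "" = _
    rw [hkeys, pvFoldl_line]
    congr 1
    congr 1
    apply List.map_congr_left
    intro k _
    rw [PySem.Dict.getD_counter]
    simp [pvLineA, pvLineB]
  rw [hA, String.empty_append]
  set keys := PySem.List.sorted (PySem.Set.ofList l) (fun k => k) false with hkeysdef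
  have hpair : keys.Pairwise (· < ·) := PySem.List.sorted_ofList_pairwise_lt l
  have hmem : ∀ a, a ∈ keys ↔ a ∈ l := by
    intro a
    rw [hkeysdef, PySem.List.mem_sorted, PySem.Set.mem_ofList]
  have hnd : keys.Nodup :=
    (PySem.List.sorted_perm _ _ _).nodup_iff.mpr (PySem.Set.nodup_ofList l)
  have hsl : PySem.List.sorted l (fun x => x) false = pvBlocks l keys :=
    PySem.List.sorted_id_eq_of_perm_of_pairwise l (pvBlocks l keys)
      (pvBlocks_perm l keys hnd hmem) (pvBlocks_pairwise l keys hpair)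
  unfold create_hist_from_dist_alt
  rw [hsl]
  cases hk : keys with
  | nil =>
    have hl : l = [] := by
      cases l with
      | nil => rfl
      | cons x xs =>
        exact absurd ((hmem x).mpr (by simp)) (by simp [hk])
    subst hl
    simp only [List.map_nil]
    simp [pvBlocks, PySem.Str.join, PySem.Chars.join, List.intercalate]
  | cons k ks =>
    have h1 : 1 ≤ l.count k := List.count_pos_iff.mpr ((hmem k).mp (by simp [hk]))
    have hpair' := hk ▸ hpair
    have hblk : pvBlocks l (k :: ks) = k :: (List.replicate (l.count k - 1) k ++ pvBlocks l ks) := by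
      simp only [pvBlocks, List.flatMap_cons]
      rw [show l.count k = (l.count k - 1) + 1 by omega, List.replicate_succ]
      simp
    rw [hblk]
    show _ = PySem.Str.join "" (pvRuns k 1 (List.replicate (l.count k - 1) k ++ pvBlocks l ks))
    rw [pvRuns_replicate, show 1 + (l.count k - 1) = l.count k by omega]
    rw [pvRuns_blocks l ks k (l.count k) (List.pairwise_cons.mp hpair').1
      (List.pairwise_cons.mp hpair').2
      (fun x hx => List.count_pos_iff.mpr ((hmem x).mp (by simp [hk, hx])))]
    simp

-- ===== VERDICT (by name: the statement is the Claim_ definition above) =====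
theorem create_hist_from_dist_spec : Claim_equal_create_hist_from_dist := by
  intro l _
  exact pv_main l
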